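-- pv_equiv track=rewrite | github.com/TheGringo-ai/ElGringo | mlx-training/scripts/merge_firebase_data.py | validate_example
-- ===== SOURCE A (Python) =====
-- def validate_example(example: dict) -> bool:
--     """Validate a training example has proper structure."""
--     if 'messages' not in example:
--         return False
--     messages = example['messages']
--     if len(messages) < 2:
--         return False
--     # Check for user and assistant messages
--     roles = [m.get('role') for m in messages]
--     if 'user' not in roles or 'assistant' not in roles:
--         return False
--     # Check content length
--     for msg in messages:
--         content = msg.get('content', '')
--         if len(content) < 10:
--             return False
--     return True
-- ===== SOURCE B (Python) =====
-- def validate_example(example: dict) -> bool: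
--     """Validate a training example has proper structure (single fused pass)."""
--     if 'messages' not in example:
--         return False
--     messages = example['messages']
--     if len(messages) < 2:
--         return False
--     has_user = False
--     has_assistant = False
--     for m in messages:
--         if len(m.get('content', '')) < 10:
--             return False
--         r = m.get('role')
--         if r == 'user':
--             has_user = True
--         elif r == 'assistant':
--             has_assistant = True
--     return has_user and has_assistant
-- ===== Notes on version B (the rewrite author's own statement) =====
-- stated objective: alternative
-- what changed: Replaces A's two separate scans (a roles list + membership tests, then a content-length loop) with one fused pass that accumulates has_user/has_assistant flags and early-returns on short content.
import Mathlib
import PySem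

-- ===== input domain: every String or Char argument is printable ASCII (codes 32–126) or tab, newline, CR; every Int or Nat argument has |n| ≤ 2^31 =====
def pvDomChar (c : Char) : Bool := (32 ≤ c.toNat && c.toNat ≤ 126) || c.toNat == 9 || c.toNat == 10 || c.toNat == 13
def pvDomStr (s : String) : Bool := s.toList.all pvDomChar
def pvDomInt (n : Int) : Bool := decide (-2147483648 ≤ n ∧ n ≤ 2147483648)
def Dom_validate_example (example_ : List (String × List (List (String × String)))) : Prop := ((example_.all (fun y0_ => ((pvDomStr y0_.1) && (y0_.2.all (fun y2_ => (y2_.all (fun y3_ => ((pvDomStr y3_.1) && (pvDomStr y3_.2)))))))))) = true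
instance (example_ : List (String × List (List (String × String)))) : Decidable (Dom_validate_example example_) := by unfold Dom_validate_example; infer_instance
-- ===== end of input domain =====

-- B fuses A's two scans (roles list + content loop) into one pass with has_user/has_assistant flags; alternative decomposition, same cost.


-- ===== PORT A =====
def validate_example (example_ : List (String × List (List (String × String)))) : Bool :=
  match (PySem.Dict.mk example_).get? "messages" with
  | none => false
  | some messages =>
    if PySem.List.len messages < 2 then false
    else
      let roles := messages.map (fun m => (PySem.Dict.mk m).get? "role")
      if !(roles.contains (some "user")) || !(roles.contains (some "assistant")) then false
      else messages.all (fun m =>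
        !(PySem.Str.len ((PySem.Dict.mk m).getD "content" "") < 10))

-- ===== PORT B =====
def valScan_alt : List (List (String × String)) → Bool → Bool → Bool
  | [], hu, ha => hu && ha
  | m :: rest, hu, ha =>
    if PySem.Str.len ((PySem.Dict.mk m).getD "content" "") < 10 then false
    else
      let r := (PySem.Dict.mk m).get? "role"
      if r = some "user" then valScan_alt rest true ha
      else if r = some "assistant" then valScan_alt rest hu true
      else valScan_alt rest hu ha

def validate_example_alt (example_ : List (String × List (List (String × String)))) : Bool :=
  match (PySem.Dict.mk example_).get? "messages" with
  | none => false
  | some messages =>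
    if PySem.List.len messages < 2 then false
    else valScan_alt messages false false

-- ===== PRECONDITION & SPEC =====
def Spec_validate_example (example_ : List (String × List (List (String × String)))) (out : Bool) : Prop := out = validate_example_alt example_
instance (example_ : List (String × List (List (String × String)))) (out : Bool) : Decidable (Spec_validate_example example_ out) := by unfold Spec_validate_example; infer_instance

-- ===== CLAIM (what is proved, stated in full; the proofs are below) =====
def Claim_equal_validate_example : Prop := ∀ (example_ : List (String × List (List (String × String)))), Dom_validate_example example_ → Spec_validate_example example_ (validate_example example_)

-- ===== LEMMAS AND PROOFS =====

/-- B's fused scan equals: all contents long enough AND (flag-or-a-user-role) AND (flag-or-an-assistant-role). -/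
lemma valScan_alt_eq (ms : List (List (String × String))) (hu ha : Bool) :
    valScan_alt ms hu ha =
      ((ms.all (fun m => !(PySem.Str.len ((PySem.Dict.mk m).getD "content" "") < 10)))
        && (hu || (ms.map (fun m => (PySem.Dict.mk m).get? "role")).contains (some "user"))
        && (ha || (ms.map (fun m => (PySem.Dict.mk m).get? "role")).contains (some "assistant"))) := by
  induction ms generalizing hu ha with
  | nil => simp [valScan_alt]
  | cons m rest ih =>
    simp only [valScan_alt, List.all_cons, List.map_cons, List.contains_cons]
    by_cases hc : PySem.Str.len ((PySem.Dict.mk m).getD "content" "") < 10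
    · rw [if_pos hc]; simp_all
    · rw [if_neg hc]
      have hc' : 10 ≤ ((PySem.Dict.mk m).getD "content" "").length := by simpa using hc
      have hd : decide (((PySem.Dict.mk m).getD "content" "").length < 10) = false :=
        decide_eq_false (by omega)
      by_cases h1 : (PySem.Dict.mk m).get? "role" = some "user"
      · rw [if_pos h1, ih]; simp [h1, hd]
      · rw [if_neg h1]
        by_cases h2 : (PySem.Dict.mk m).get? "role" = some "assistant"
        · rw [if_pos h2, ih]; simp [h1, h2, hd]
        · rw [if_neg h2, ih]
          have e1 : (some "user" == (PySem.Dict.mk m).get? "role") = false :=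
            beq_eq_false_iff_ne.mpr (fun h => h1 h.symm)
          have e2 : (some "assistant" == (PySem.Dict.mk m).get? "role") = false :=
            beq_eq_false_iff_ne.mpr (fun h => h2 h.symm)
          simp [e1, e2, hd]

-- ===== VERDICT (by name: the statement is the Claim_ definition above) =====
theorem validate_example_spec : Claim_equal_validate_example := by
  intro example_ _
  unfold Spec_validate_example validate_example validate_example_alt
  rcases h : (PySem.Dict.mk example_).get? "messages" with _ | messages
  · rfl
  · simp only
    split
    · rfl
    · rw [valScan_alt_eq]
      by_cases hu : ∃ a ∈ messages, (PySem.Dict.mk a).get? "role" = some "user" <;>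
        by_cases ha : ∃ a ∈ messages, (PySem.Dict.mk a).get? "role" = some "assistant" <;>
          simp [hu, ha]
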